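-- pv_equiv track=rewrite | github.com/Minlor/LumiSync | lumisync/utils/colors.py | fit_colors_to_count
-- ===== SOURCE A (Python) =====
-- from typing import Iterable, List, Tuple
--
-- def clamp_channel(value: int) -> int:
--     """Clamp a color channel to the byte range expected by Govee payloads."""
--     try:
--         channel = int(value)
--     except (TypeError, ValueError):
--         channel = 0
--     return max(0, min(255, channel))
--
-- def normalize_rgb(color: Iterable[int]) -> Tuple[int, int, int]:
--     """Normalize any RGB-like iterable into a safe 3-byte tuple."""
--     values = list(color)[:3]
--     values.extend([0] * (3 - len(values)))
--     return (
--         clamp_channel(values[0]),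
--         clamp_channel(values[1]),
--         clamp_channel(values[2]),
--     )
--
-- def fit_colors_to_count(
--     colors: List[Tuple[int, int, int]],
--     count: int,
-- ) -> List[Tuple[int, int, int]]:
--     """Resize a color list to a device's segment count by cycling samples."""
--     count = max(0, int(count))
--     if count == 0:
--         return []
--     if not colors:
--         return [(0, 0, 0)] * count
--     normalized = [normalize_rgb(color) for color in colors]
--     return [normalized[index % len(normalized)] for index in range(count)]
-- ===== SOURCE B (Python) =====
-- from typing import Iterable, List, Tuple
--
-- def clamp_channel(value: int) -> int:
--     """Clamp a color channel to the byte range expected by Govee payloads."""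
--     try:
--         channel = int(value)
--     except (TypeError, ValueError):
--         channel = 0
--     return max(0, min(255, channel))
--
-- def normalize_rgb(color: Iterable[int]) -> Tuple[int, int, int]:
--     """Normalize any RGB-like iterable into a safe 3-byte tuple."""
--     values = list(color)[:3]
--     values.extend([0] * (3 - len(values)))
--     return (
--         clamp_channel(values[0]),
--         clamp_channel(values[1]),
--         clamp_channel(values[2]),
--     )
--
-- def fit_colors_to_count(
--     colors: List[Tuple[int, int, int]],
--     count: int,
-- ) -> List[Tuple[int, int, int]]:
--     """Resize a color list by popping from a round-robin queue of samples."""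
--     queue = [normalize_rgb(color) for color in colors] or [(0, 0, 0)]
--     out = []
--     for _ in range(max(0, int(count))):
--         color = queue.pop(0)
--         out.append(color)
--         queue.append(color)
--     return out
-- ===== Notes on version B (the rewrite author's own statement) =====
-- stated objective: alternative
-- what changed: Replaces the modulo-indexing comprehension and its two early-return guards with a round-robin queue: pop a color from the front, emit it, push it to the back, count times; the empty-colors case is subsumed by seeding the queue with a single black sample.
import Mathlib
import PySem

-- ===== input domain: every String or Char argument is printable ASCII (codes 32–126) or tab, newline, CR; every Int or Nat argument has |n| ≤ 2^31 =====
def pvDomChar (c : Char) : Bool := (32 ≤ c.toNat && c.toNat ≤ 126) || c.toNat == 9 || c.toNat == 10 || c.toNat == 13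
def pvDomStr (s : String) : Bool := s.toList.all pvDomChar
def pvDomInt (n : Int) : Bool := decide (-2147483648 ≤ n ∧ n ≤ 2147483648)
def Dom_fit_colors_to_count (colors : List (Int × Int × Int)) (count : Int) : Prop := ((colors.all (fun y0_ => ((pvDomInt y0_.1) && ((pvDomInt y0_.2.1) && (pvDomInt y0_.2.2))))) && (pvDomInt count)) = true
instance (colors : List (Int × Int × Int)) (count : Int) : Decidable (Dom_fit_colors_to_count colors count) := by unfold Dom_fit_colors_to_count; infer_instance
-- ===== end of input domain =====

-- B replaces A's guards + per-index modulo comprehension with a round-robin queue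
-- (pop front, emit, push back), seeded with one black sample when colors is empty; objective: alternative.

-- ===== PORT A =====
-- clamp_channel: int(value) on an int is the identity, the except branch is unreachable
def pvClampChannel (value : Int) : Int := max 0 (min 255 value)

-- normalize_rgb: the argument is always a 3-tuple here, so list(color)[:3] is the three components
def pvNormalizeRgb (color : Int × Int × Int) : Int × Int × Int :=
  (pvClampChannel color.1, pvClampChannel color.2.1, pvClampChannel color.2.2)

def fit_colors_to_count (colors : List (Int × Int × Int)) (count : Int) : List (Int × Int × Int) :=
  let count := max 0 count
  if count = 0 then []
  else if colors = [] then List.replicate count.toNat (0, 0, 0)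
  else
    let normalized := colors.map pvNormalizeRgb
    -- pyGetD is exact here: 0 ≤ index % len < len, so Python never raises
    (PySem.List.pyRange 0 count 1).map (fun index =>
      PySem.List.pyGetD normalized (PySem.Int.mod index (normalized.length : Int)) (0, 0, 0))

-- ===== PORT B =====
-- the round-robin loop: n iterations of pop-front / emit / push-back, output built front-to-back
def pvRoundRobin : Nat → List (Int × Int × Int) → List (Int × Int × Int)
  | 0, _ => []
  | _ + 1, [] => []          -- unreachable: the queue is seeded nonempty and stays so
  | n + 1, color :: rest => color :: pvRoundRobin n (rest ++ [color])

def fit_colors_to_count_alt (colors : List (Int × Int × Int)) (count : Int) : List (Int × Int × Int) :=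
  let queue := match colors.map pvNormalizeRgb with
    | [] => [(0, 0, 0)]      -- Python's `or [(0,0,0)]`
    | l => l
  pvRoundRobin (max 0 count).toNat queue

-- ===== PRECONDITION & SPEC =====
def Spec_fit_colors_to_count (colors : List (Int × Int × Int)) (count : Int) (out : List (Int × Int × Int)) : Prop := out = fit_colors_to_count_alt colors count
instance (colors : List (Int × Int × Int)) (count : Int) (out : List (Int × Int × Int)) : Decidable (Spec_fit_colors_to_count colors count out) := by unfold Spec_fit_colors_to_count; infer_instance

-- ===== CLAIM (what is proved, stated in full; the proofs are below) =====
def Claim_equal_fit_colors_to_count : Prop := ∀ (colors : List (Int × Int × Int)) (count : Int), Dom_fit_colors_to_count colors count → Spec_fit_colors_to_count colors count (fit_colors_to_count colors count)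

-- ===== LEMMAS AND PROOFS =====

-- on a singleton queue the rotation is the identity, so the loop replicates
theorem pvRoundRobin_singleton (n : Nat) (x : Int × Int × Int) :
    pvRoundRobin n [x] = List.replicate n x := by
  induction n with
  | zero => rfl
  | succ n ih => simp [pvRoundRobin, List.replicate_succ, ih]

theorem pvRoundRobin_length (n : Nat) (q : List (Int × Int × Int)) (hq : q ≠ []) :
    (pvRoundRobin n q).length = n := by
  induction n generalizing q with
  | zero => rfl
  | succ n ih =>
    match q with
    | [] => exact absurd rfl hq
    | c :: rest =>
      simp [pvRoundRobin, ih (rest ++ [c]) (by simp)]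

-- element i of the round-robin output is element (i % |q|) of the queue
theorem pvRoundRobin_getElem? (n : Nat) (q : List (Int × Int × Int)) (hq : q ≠ [])
    (i : Nat) (hi : i < n) :
    (pvRoundRobin n q)[i]? = q[i % q.length]? := by
  induction n generalizing q i with
  | zero => omega
  | succ n ih =>
    match q with
    | [] => exact absurd rfl hq
    | c :: rest =>
      match i with
      | 0 => simp [pvRoundRobin]
      | j + 1 =>
        have hL : (c :: rest).length = rest.length + 1 := by simp
        have hrec := ih (rest ++ [c]) (by simp) j (by omega)
        simp only [pvRoundRobin, List.getElem?_cons_succ]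
        rw [hrec]
        rw [show (rest ++ [c]).length = rest.length + 1 by simp,
            show (c :: rest).length = rest.length + 1 by simp]
        have hlen : (rest ++ [c]).length = rest.length + 1 := by simp
        set L := rest.length + 1 with hLdef
        have hk : j % L < L := Nat.mod_lt _ (by omega)
        by_cases hcase : j % L = rest.length
        · have h1 : (j + 1) % L = 0 := by
            rw [Nat.add_mod, hcase]; simp [hLdef]
          rw [h1, hcase]
          simp
        · have h1 : (j + 1) % L = j % L + 1 := by
            rw [Nat.add_mod]
            have : j % L + 1 < L := by omega
            simp [Nat.mod_eq_of_lt this]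
          rw [h1]
          have hjr : j % L < rest.length := by omega
          rw [List.getElem?_cons_succ, List.getElem?_append_left hjr]

-- ===== VERDICT (by name: the statement is the Claim_ definition above) =====

theorem fit_colors_to_count_spec : Claim_equal_fit_colors_to_count := by
  intro colors count _
  unfold Spec_fit_colors_to_count fit_colors_to_count fit_colors_to_count_alt
  by_cases hcs : colors = []
  · subst hcs
    simp only [List.map_nil]
    by_cases h0 : max 0 count = 0
    · simp [h0, pvRoundRobin_singleton]
    · simp [h0, pvRoundRobin_singleton]
  · have hmap : colors.map pvNormalizeRgb ≠ [] := by
      simp [hcs]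
    by_cases h0 : max 0 count = 0
    · simp only [h0, if_pos rfl]
      cases hl : colors.map pvNormalizeRgb with
      | nil => exact absurd hl hmap
      | cons a l => simp [pvRoundRobin]
    · simp only [h0, hcs, if_false]
      cases hll : colors.map pvNormalizeRgb with
      | nil => exact absurd hll hmap
      | cons a t =>
        set c := max 0 count with hc
        set l := a :: t with hldef
        have hL : 0 < l.length := by simp [hldef]
        have hcpos : 0 < c := by omega
        have hlne : l ≠ [] := by simp [hldef]
        have hcnat : c = (c.toNat : Int) := by omega
        rw [hcnat, PySem.List.pyRange_zero_natCast]
        simp only [Int.toNat_natCast]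
        apply List.ext_getElem?
        intro i
        by_cases hi : i < c.toNat
        · have hiL : i % l.length < l.length := Nat.mod_lt _ hL
          rw [pvRoundRobin_getElem? c.toNat l hlne i hi]
          simp only [List.map_map, List.getElem?_map]
          simp [hi, List.getElem?_eq_getElem hiL]
          rw [← Int.natCast_mod, PySem.List.pyGetD_natCast, List.getD_eq_getElem l _ hiL]
        · have h2 : (pvRoundRobin c.toNat l)[i]? = none := by
            rw [List.getElem?_eq_none]
            rw [pvRoundRobin_length c.toNat l hlne]; omega
          rw [h2]
          simp [hi]
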